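-- pv_equiv track=rewrite | github.com/ker2x/Clauding | checkers/checkers/engine/bitboard.py | flip_bitboard
-- ===== SOURCE A (Python) =====
-- BOARD_SIZE = 10
--
-- NUM_SQUARES = 50
--
-- def set_bit(bitboard: int, square: int) -> int:
--     """Set bit at given square."""
--     return bitboard | (1 << square)
--
-- def get_bit(bitboard: int, square: int) -> bool:
--     """Check if bit is set at given square."""
--     return bool(bitboard & (1 << square))
--
-- def flip_bitboard(bitboard: int) -> int:
--     """Flip bitboard vertically (for switching perspectives)."""
--     flipped = 0
--     for square in range(NUM_SQUARES):
--         if get_bit(bitboard, square):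
--             row = square // 5
--             col_offset = square % 5
--             flipped_row = BOARD_SIZE - 1 - row
--             flipped_square = flipped_row * 5 + col_offset
--             flipped = set_bit(flipped, flipped_square)
--     return flipped
-- ===== SOURCE B (Python) =====
-- BOARD_SIZE = 10
--
-- NUM_SQUARES = 50
--
--
-- def flip_bitboard(bitboard: int) -> int:
--     """Flip bitboard vertically by relocating whole 5-bit rows at once."""
--     flipped = 0
--     for row in range(BOARD_SIZE):
--         chunk = (bitboard >> (row * 5)) & 0b11111
--         flipped |= chunk << ((9 - row) * 5)
--     return flipped
-- ===== Notes on version B (the rewrite author's own statement) =====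
-- stated objective: simpler
-- what changed: B loops over the board's rows, moving each whole five-bit row to its mirrored position with one shift-and-mask-and-or, instead of A's per-square loop that tests and re-sets every board bit individually via get_bit/set_bit helpers.
import Mathlib
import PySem

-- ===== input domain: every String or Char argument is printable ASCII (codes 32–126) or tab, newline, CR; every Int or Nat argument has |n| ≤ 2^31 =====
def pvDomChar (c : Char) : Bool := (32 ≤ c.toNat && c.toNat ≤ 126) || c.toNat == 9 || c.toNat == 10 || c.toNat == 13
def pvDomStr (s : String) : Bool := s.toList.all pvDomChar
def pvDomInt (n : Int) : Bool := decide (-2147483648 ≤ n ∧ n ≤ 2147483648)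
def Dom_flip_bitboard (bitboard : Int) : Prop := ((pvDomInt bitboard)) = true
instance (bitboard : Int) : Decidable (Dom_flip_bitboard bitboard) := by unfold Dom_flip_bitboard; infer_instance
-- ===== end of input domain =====

-- B moves whole five-bit rows by shift-and-mask instead of A's per-square bit test/set loop (objective: simpler).

-- ===== PORT A =====
-- set_bit(bitboard, square); Python 'bitboard | (1 << square)' — '|' is PySem.Int.bor, '<<' is core '<<<' with a Nat shift (square is a nonnegative range element)
def pv_set_bit (bitboard : Int) (square : Int) : Int :=
  PySem.Int.bor bitboard ((1 : Int) <<< square.toNat)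

-- get_bit(bitboard, square); bool(bitboard & (1 << square)) — truthiness of an int is ≠ 0
def pv_get_bit (bitboard : Int) (square : Int) : Bool :=
  PySem.Int.band bitboard ((1 : Int) <<< square.toNat) != 0

def flip_bitboard (bitboard : Int) : Int :=
  (PySem.List.pyRange 0 50 1).foldl
    (fun flipped square =>
      if pv_get_bit bitboard square then
        let row := PySem.Int.floordiv square 5
        let col_offset := PySem.Int.mod square 5
        let flipped_row := 10 - 1 - row
        pv_set_bit flipped (flipped_row * 5 + col_offset)
      else flipped) 0

-- ===== PORT B =====
def flip_bitboard_alt (bitboard : Int) : Int :=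
  (PySem.List.pyRange 0 10 1).foldl
    (fun flipped row =>
      let chunk := PySem.Int.band (bitboard >>> (row * 5).toNat) 31
      PySem.Int.bor flipped (chunk <<< (((9 : Int) - row) * 5).toNat)) 0

-- ===== PRECONDITION & SPEC =====
def Spec_flip_bitboard (bitboard : Int) (out : Int) : Prop := out = flip_bitboard_alt bitboard
instance (bitboard : Int) (out : Int) : Decidable (Spec_flip_bitboard bitboard out) := by unfold Spec_flip_bitboard; infer_instance

-- ===== CLAIM (what is proved, stated in full; the proofs are below) =====
def Claim_equal_flip_bitboard : Prop := ∀ (bitboard : Int), Dom_flip_bitboard bitboard → Spec_flip_bitboard bitboard (flip_bitboard bitboard)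

-- ===== LEMMAS AND PROOFS =====

-- Nat-level shadow of A's fold step (indices are already Nat, bits read via Int.testBit)
def pvAstepN (b : Int) (a : Nat) (sq : Nat) : Nat :=
  if b.testBit sq then a ||| (1 <<< ((9 - sq / 5) * 5 + sq % 5)) else a

def pvAnat (b : Int) : Nat := (List.range 50).foldl (pvAstepN b) 0

-- Nat-level shadow of B's fold step
def pvcN (b : Int) (r : Nat) : Nat := (PySem.Int.band (b >>> (r * 5)) 31).toNat

def pvBstepN (b : Int) (a : Nat) (r : Nat) : Nat := a ||| (pvcN b r <<< ((9 - r) * 5))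

def pvBnat (b : Int) : Nat := (List.range 10).foldl (pvBstepN b) 0

theorem pv_testBit_31 (j : Nat) : (31 : Nat).testBit j = decide (j < 5) := by
  by_cases h : j < 5
  · interval_cases j <;> decide
  · simp [h, Nat.testBit_lt_two_pow (by calc (31:Nat) < 2^5 := by norm_num
      _ ≤ 2^j := Nat.pow_le_pow_right (by norm_num) (by omega))]

-- bit j of (31 - u) for a 5-bit u is the complement of bit j of u
theorem pv_testBit_sub31 (u : Nat) (hu : u ≤ 31) (j : Nat) :
    (31 - u).testBit j = (decide (j < 5) && !u.testBit j) := by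
  by_cases h : j < 5
  · interval_cases u <;> interval_cases j <;> decide
  · simp [h, Nat.testBit_lt_two_pow (x := 31 - u) (by calc 31 - u < 2^5 := by omega
      _ ≤ 2^j := Nat.pow_le_pow_right (by norm_num) (by omega))]

-- get_bit reads Int.testBit (Python-exact on negatives)
theorem pv_get_bit_eq (b : Int) (k : Nat) : pv_get_bit b (k : Int) = b.testBit k := by
  have h1 : ((1 : Int) <<< ((k : Int)).toNat) = Int.ofNat (2 ^ k) := by
    simp only [Int.toNat_natCast]
    show Int.ofNat (1 <<< k) = Int.ofNat (2 ^ k)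
    simp [Nat.shiftLeft_eq]
  cases b with
  | ofNat n =>
    simp only [pv_get_bit, h1]
    rw [show Int.ofNat n = ((n : Nat) : Int) from rfl,
        show Int.ofNat (2 ^ k) = ((2 ^ k : Nat) : Int) from rfl,
        PySem.Int.band_natCast]
    rw [Nat.and_two_pow]
    cases hbit : n.testBit k <;>
      simp [Int.testBit, hbit]
  | negSucc n =>
    simp only [pv_get_bit, h1]
    have hneg : ¬ (0 : Int) ≤ Int.negSucc n := by omega
    have : PySem.Int.band (Int.negSucc n) (Int.ofNat (2 ^ k)) =
        ((2 ^ k - (2 ^ k &&& n) : Nat) : Int) := by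
      simp only [PySem.Int.band, hneg]
      norm_num
      rfl
    rw [this, Nat.and_comm, Nat.and_two_pow]
    cases hbit : n.testBit k <;>
      simp [Int.testBit, hbit]

-- Python '>>' shifts bits down, also on negatives
theorem pv_testBit_shiftRight (b : Int) (m j : Nat) :
    (b >>> m).testBit j = b.testBit (m + j) := by
  cases b with
  | ofNat n =>
    show (Int.ofNat (n >>> m)).testBit j = _
    simp [Int.testBit, Nat.testBit_shiftRight]
  | negSucc n =>
    show (Int.negSucc (n >>> m)).testBit j = _
    simp [Int.testBit, Nat.testBit_shiftRight]

theorem pv_band31_nonneg (x : Int) : 0 ≤ PySem.Int.band x 31 := by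
  unfold PySem.Int.band
  split_ifs <;> omega

theorem pv_band31_testBit (x : Int) (j : Nat) :
    (PySem.Int.band x 31).toNat.testBit j = (decide (j < 5) && x.testBit j) := by
  cases x with
  | ofNat n =>
    have hb : PySem.Int.band (Int.ofNat n) 31 = ((n &&& 31 : Nat) : Int) := by
      rw [show (31 : Int) = ((31 : Nat) : Int) from rfl,
        show Int.ofNat n = ((n : Nat) : Int) from rfl, PySem.Int.band_natCast]
    rw [hb, Int.toNat_natCast, Nat.testBit_and, pv_testBit_31]
    cases h : n.testBit j <;> simp [Int.testBit, h]
  | negSucc n =>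
    have hneg : ¬ (0 : Int) ≤ Int.negSucc n := by omega
    have hb : PySem.Int.band (Int.negSucc n) 31 = ((31 - (31 &&& n) : Nat) : Int) := by
      simp only [PySem.Int.band, hneg]
      norm_num
      rfl
    rw [hb, Int.toNat_natCast, pv_testBit_sub31 _ Nat.and_le_left, Nat.testBit_and, pv_testBit_31]
    cases h : n.testBit j <;> by_cases h5 : j < 5 <;> simp [Int.testBit, h, h5]

-- chunk bits are the five row bits of the input
theorem pvcN_testBit (b : Int) (r j : Nat) :
    (pvcN b r).testBit j = (decide (j < 5) && b.testBit (r * 5 + j)) := by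
  rw [pvcN, pv_band31_testBit, pv_testBit_shiftRight]

theorem pv_or_two_pow_testBit (a k i : Nat) :
    (a ||| 1 <<< k).testBit i = (a.testBit i || (i == k)) := by
  rw [Nat.testBit_or, Nat.shiftLeft_eq, one_mul, Nat.testBit_two_pow]
  rcases eq_or_ne i k with hik | hik
  · subst hik; simp
  · simp [hik, Ne.symm hik]

-- characterization of A's Nat fold
theorem pvAnat_char (b : Int) (l : List Nat) (a : Nat) (i : Nat) :
    (l.foldl (pvAstepN b) a).testBit i =
      (a.testBit i || l.any fun sq => b.testBit sq && (i == (9 - sq / 5) * 5 + sq % 5)) := by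
  induction l generalizing a with
  | nil => simp
  | cons sq t ih =>
    rw [List.foldl_cons, ih, List.any_cons]
    unfold pvAstepN
    cases hb : b.testBit sq
    · simp
    · rw [if_pos rfl, pv_or_two_pow_testBit]
      cases a.testBit i <;> simp

theorem pvBnat_char (b : Int) (l : List Nat) (a : Nat) (i : Nat) :
    (l.foldl (pvBstepN b) a).testBit i =
      (a.testBit i || l.any fun r => decide ((9 - r) * 5 ≤ i) && (pvcN b r).testBit (i - (9 - r) * 5)) := by
  induction l generalizing a with
  | nil => simp
  | cons r t ih =>
    rw [List.foldl_cons, ih, List.any_cons]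
    unfold pvBstepN
    rw [Nat.testBit_or, Nat.testBit_shiftLeft]
    cases a.testBit i <;> simp [ge_iff_le]

-- the two characterizations agree bit by bit
theorem pv_bits_agree (b : Int) (i : Nat) : (pvAnat b).testBit i = (pvBnat b).testBit i := by
  rw [pvAnat, pvBnat, pvAnat_char, pvBnat_char]
  simp only [Nat.zero_testBit, Bool.false_or]
  rw [Bool.eq_iff_iff]
  simp only [List.any_eq_true, List.mem_range, Bool.and_eq_true, decide_eq_true_eq, beq_iff_eq]
  constructor
  · rintro ⟨sq, hsq, hbit, hi⟩
    refine ⟨sq / 5, by omega, by omega, ?_⟩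
    rw [pvcN_testBit]
    have harg : sq / 5 * 5 + (i - (9 - sq / 5) * 5) = sq := by omega
    simp [harg, hbit]
    omega
  · rintro ⟨r, hr, hle, hbit⟩
    rw [pvcN_testBit] at hbit
    simp only [Bool.and_eq_true, decide_eq_true_eq] at hbit
    obtain ⟨hj5, hbit'⟩ := hbit
    refine ⟨r * 5 + (i - (9 - r) * 5), by omega, hbit', by omega⟩

-- casting a fold over naturals through Int, step by step
theorem pv_foldl_cast (f : Int → Int → Int) (g : Nat → Nat → Nat) :
    ∀ (l : List Nat), (∀ (a x : Nat), x ∈ l → f (↑a) (↑x) = ↑(g a x)) → ∀ (a : Nat),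
      (l.map (Nat.cast : Nat → Int)).foldl f (↑a) = ↑(l.foldl g a)
  | [], _, _ => rfl
  | x :: t, h, a => by
    rw [List.map_cons, List.foldl_cons, List.foldl_cons, h a x (by simp)]
    exact pv_foldl_cast f g t (fun a y hy => h a y (by simp [hy])) _

-- lift port A to its Nat shadow
theorem pvA_lift (b : Int) : flip_bitboard b = ((pvAnat b : Nat) : Int) := by
  have hrange : PySem.List.pyRange 0 50 1 = (List.range 50).map (Nat.cast : Nat → Int) := by decide
  rw [flip_bitboard, hrange]
  refine pv_foldl_cast _ (pvAstepN b) (List.range 50) ?_ 0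
  intro a sq hsq
  have h50 : sq < 50 := List.mem_range.mp hsq
  rw [pv_get_bit_eq, pvAstepN]
  cases hb : b.testBit sq
  · simp
  · simp only [if_pos]
    have h1 : PySem.Int.floordiv (sq : Int) 5 = ((sq / 5 : Nat) : Int) := by
      exact_mod_cast PySem.Int.floordiv_natCast sq 5
    have h2 : PySem.Int.mod (sq : Int) 5 = ((sq % 5 : Nat) : Int) := by
      exact_mod_cast PySem.Int.mod_natCast sq 5
    have hidx : (10 - 1 - PySem.Int.floordiv (sq : Int) 5) * 5 + PySem.Int.mod (sq : Int) 5
        = (((9 - sq / 5) * 5 + sq % 5 : Nat) : Int) := by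
      rw [h1, h2]; omega
    rw [hidx, pv_set_bit, Int.toNat_natCast,
      show ((1 : Int) <<< ((9 - sq / 5) * 5 + sq % 5)) = (((1 <<< ((9 - sq / 5) * 5 + sq % 5)) : Nat) : Int) from rfl,
      PySem.Int.bor_natCast]

-- lift port B to its Nat shadow
theorem pvB_lift (b : Int) : flip_bitboard_alt b = ((pvBnat b : Nat) : Int) := by
  have hrange : PySem.List.pyRange 0 10 1 = (List.range 10).map (Nat.cast : Nat → Int) := by decide
  rw [flip_bitboard_alt, hrange]
  refine pv_foldl_cast _ (pvBstepN b) (List.range 10) ?_ 0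
  intro a r hr
  have h10 : r < 10 := List.mem_range.mp hr
  show PySem.Int.bor _ _ = _
  have hsh : (((r : Nat) : Int) * 5).toNat = r * 5 := by omega
  have hsh2 : (((9 : Int) - ((r : Nat) : Int)) * 5).toNat = (9 - r) * 5 := by omega
  rw [hsh, hsh2, Int.shiftRight_natCast_right]
  have hc : PySem.Int.band (b >>> (r * 5)) 31 = ((pvcN b r : Nat) : Int) :=
    (Int.toNat_of_nonneg (pv_band31_nonneg _)).symm
  rw [hc, pvBstepN,
    show (((pvcN b r : Nat) : Int) <<< ((9 - r) * 5)) = (((pvcN b r <<< ((9 - r) * 5)) : Nat) : Int) from rfl,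
    PySem.Int.bor_natCast]

-- ===== VERDICT (by name: the statement is the Claim_ definition above) =====
theorem flip_bitboard_spec : Claim_equal_flip_bitboard := by
  intro b _
  show flip_bitboard b = flip_bitboard_alt b
  rw [pvA_lift, pvB_lift, Nat.eq_of_testBit_eq (pv_bits_agree b)]
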